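-- pv_equiv track=rewrite | github.com/qeedquan/challenges | poj/2602-superlong-sums.py | supersum
-- ===== SOURCE A (Python) =====
-- def supersum(a):
--     r = []
--     c = 0
--     for i in range(len(a) - 1, -1, -1):
--         v = a[i][0] + a[i][1] + c
--         c = v // 10
--         r.append(v % 10)
--
--     if c > 0:
--         r.append(c)
--
--     return r[::-1]
-- ===== SOURCE B (Python) =====
-- def supersum(a):
--     n = len(a)
--     t = 0
--     for x, y in a:
--         t = 10 * t + x + y
--     p = 10 ** n
--     c = t // p
--     rem = t % p
--     digits = []
--     for _ in range(n):
--         digits.insert(0, rem % 10)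
--         rem //= 10
--     return ([c] if c > 0 else []) + digits
-- ===== Notes on version B (the rewrite author's own statement) =====
-- stated objective: alternative
-- what changed: Instead of a right-to-left digit loop with a running carry, B folds the column sums into one integer by Horner's rule, splits it once into quotient/remainder by 10^len(a), and extracts the remainder's digits positionally.
import Mathlib
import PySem

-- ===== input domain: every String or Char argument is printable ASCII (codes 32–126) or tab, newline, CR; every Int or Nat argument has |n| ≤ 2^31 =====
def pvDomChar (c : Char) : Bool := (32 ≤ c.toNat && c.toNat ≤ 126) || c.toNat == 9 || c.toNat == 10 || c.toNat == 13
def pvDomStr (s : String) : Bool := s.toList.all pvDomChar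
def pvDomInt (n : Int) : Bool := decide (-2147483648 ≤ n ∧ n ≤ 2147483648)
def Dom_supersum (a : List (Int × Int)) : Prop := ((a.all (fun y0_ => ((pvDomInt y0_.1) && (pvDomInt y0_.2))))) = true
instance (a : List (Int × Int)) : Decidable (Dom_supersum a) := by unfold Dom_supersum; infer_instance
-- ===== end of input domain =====

-- B replaces A's carry-propagation loop by a Horner fold into one integer followed by a
-- positional quotient/remainder digit split (alternative decomposition, not claimed faster).

-- ===== PORT A =====
-- A: right-to-left loop over the pairs, carry-propagating digit addition.
def supersum (a : List (Int × Int)) : List Int :=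
  let st := (PySem.List.pyRange ((a.length : Int) - 1) (-1) (-1)).foldl
      (fun (st : List Int × Int) i =>
        let v := (PySem.List.pyGetD a i (0, 0)).1 + (PySem.List.pyGetD a i (0, 0)).2 + st.2
        (st.1 ++ [PySem.Int.mod v 10], PySem.Int.floordiv v 10)) ([], 0)
  let r := if st.2 > 0 then st.1 ++ [st.2] else st.1
  (PySem.List.slice? r none none (-1)).getD []

-- ===== PORT B =====
-- B: Horner-fold the column sums into one integer, split by 10^n, read the digits off.
-- Source B's 'for _ in range(n): digits.insert(0, rem % 10); rem //= 10' loop: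
def supersumAltLoop : Nat → List Int × Int → List Int × Int
  | 0, st => st
  | k + 1, st => supersumAltLoop k (PySem.Int.mod st.2 10 :: st.1, PySem.Int.floordiv st.2 10)

def supersum_alt (a : List (Int × Int)) : List Int :=
  let n := a.length
  let t := a.foldl (fun t p => 10 * t + p.1 + p.2) 0
  let p : Int := 10 ^ n
  let c := PySem.Int.floordiv t p
  let rem := PySem.Int.mod t p
  let digits := (supersumAltLoop n ([], rem)).1
  (if c > 0 then [c] else []) ++ digits

-- ===== PRECONDITION & SPEC =====
def Spec_supersum (a : List (Int × Int)) (out : List Int) : Prop := out = supersum_alt a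
instance (a : List (Int × Int)) (out : List Int) : Decidable (Spec_supersum a out) := by unfold Spec_supersum; infer_instance

-- ===== CLAIM (what is proved, stated in full; the proofs are below) =====
def Claim_equal_supersum : Prop := ∀ (a : List (Int × Int)), Dom_supersum a → Spec_supersum a (supersum a)

-- ===== LEMMAS AND PROOFS =====

-- digits of r, least significant first
def pvRevdigs : Nat → Int → List Int
  | 0, _ => []
  | k + 1, r => r % 10 :: pvRevdigs k (r / 10)

-- A's carry step on a single column sum
def pvStep (st : List Int × Int) (x : Int) : List Int × Int :=
  (st.1 ++ [(x + st.2) % 10], (x + st.2) / 10)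

theorem pv_mod10 (v : Int) : PySem.Int.mod v 10 = v % 10 :=
  PySem.Int.mod_eq_emod_of_pos (by norm_num)

theorem pv_div10 (v : Int) : PySem.Int.floordiv v 10 = v / 10 :=
  PySem.Int.floordiv_eq_ediv_of_pos (by norm_num)

theorem pv_altLoop_fst : ∀ (k : Nat) (ds : List Int) (r : Int),
    (supersumAltLoop k (ds, r)).1 = (pvRevdigs k r).reverse ++ ds := by
  intro k
  induction k with
  | zero => intro ds r; simp [supersumAltLoop, pvRevdigs]
  | succ k ih =>
      intro ds r
      simp [supersumAltLoop, pvRevdigs, ih]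

theorem pv_horner_shift : ∀ (l : List Int) (i : Int),
    l.foldl (fun t y => 10 * t + y) i =
      i * 10 ^ l.length + l.foldl (fun t y => 10 * t + y) 0 := by
  intro l
  induction l with
  | nil => intro i; simp
  | cons x t ih =>
      intro i
      rw [List.foldl_cons, List.foldl_cons, ih (10 * i + x), ih (10 * 0 + x), List.length_cons]
      ring

theorem pv_mod_mul_div (z m k : Int) (hm : 0 < m) (hk : 0 < k) :
    (z % (m * k)) / m = (z / m) % k := by
  have h1 : 0 ≤ z % (m * k) := Int.emod_nonneg z (by positivity)
  have h2 : z % (m * k) < m * k := Int.emod_lt_of_pos z (by positivity)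
  have hz : z = z % (m * k) + (z / (m * k) * k) * m := by
    have := Int.mul_ediv_add_emod z (m * k); linarith [this]
  have hdiv : z / m = z % (m * k) / m + z / (m * k) * k := by
    conv_lhs => rw [hz]
    rw [Int.add_mul_ediv_right _ _ (by omega : m ≠ 0)]
  rw [hdiv, Int.add_mul_emod_self_right]
  have l1 : 0 ≤ z % (m * k) / m := Int.ediv_nonneg h1 (le_of_lt hm)
  have l2 : z % (m * k) / m < k := (Int.ediv_lt_iff_lt_mul hm).mpr (by nlinarith)
  exact (Int.emod_eq_of_lt l1 l2).symm

theorem pv_revdigs_split (k : Nat) : ∀ (R : Int),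
    pvRevdigs (k + 1) R = pvRevdigs k (R % 10 ^ k) ++ [(R / 10 ^ k) % 10] := by
  induction k with
  | zero => intro R; simp [pvRevdigs]
  | succ k ih =>
      intro R
      have hk : (0 : Int) < 10 ^ k := by positivity
      have e1 : R % 10 ^ (k + 1) % 10 = R % 10 := by
        exact Int.emod_emod_of_dvd R ⟨10 ^ k, by ring⟩
      have e2 : R % 10 ^ (k + 1) / 10 = (R / 10) % 10 ^ k := by
        have := pv_mod_mul_div R 10 (10 ^ k) (by norm_num) hk
        rw [show ((10 : Int) * 10 ^ k) = 10 ^ (k + 1) by ring] at this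
        exact this
      have e3 : R / 10 / 10 ^ k = R / 10 ^ (k + 1) := by
        rw [Int.ediv_ediv_of_nonneg (by norm_num : (0:Int) ≤ 10)]
        congr 1; ring
      calc pvRevdigs (k + 2) R
      _ = R % 10 :: pvRevdigs (k + 1) (R / 10) := rfl
      _ = R % 10 :: (pvRevdigs k (R / 10 % 10 ^ k) ++ [(R / 10 / 10 ^ k) % 10]) := by
            rw [ih (R / 10)]
      _ = pvRevdigs (k + 1) (R % 10 ^ (k + 1)) ++ [(R / 10 ^ (k + 1)) % 10] := by
            simp [pvRevdigs, e1, e2, e3]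

-- A's loop over the reversed column sums computes the digits and the final carry of Horner's value
theorem pv_main : ∀ (s : List Int),
    s.reverse.foldl pvStep ([], 0) =
      (pvRevdigs s.length (s.foldl (fun t y => 10 * t + y) 0 % 10 ^ s.length),
       s.foldl (fun t y => 10 * t + y) 0 / 10 ^ s.length) := by
  intro s
  induction s with
  | nil => simp [pvRevdigs]
  | cons x t ih =>
      have hm : (0 : Int) < 10 ^ t.length := by positivity
      set T' := t.foldl (fun t y => 10 * t + y) 0 with hT'
      have hT : (x :: t).foldl (fun t y => 10 * t + y) 0 = x * 10 ^ t.length + T' := by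
        rw [List.foldl_cons, pv_horner_shift t (10 * 0 + x), ← hT']
        norm_num
      simp only [List.reverse_cons, List.foldl_concat, ih, hT]
      set T := x * 10 ^ t.length + T' with hTdef
      have hc : (x + T' / 10 ^ t.length) = T / 10 ^ t.length := by
        rw [hTdef, show x * 10 ^ t.length + T' = T' + x * 10 ^ t.length by ring,
            Int.add_mul_ediv_right _ _ (by omega : (10:Int) ^ t.length ≠ 0)]
        ring
      have hmod : T' % 10 ^ t.length = T % 10 ^ t.length := by
        rw [hTdef, show x * 10 ^ t.length + T' = T' + x * 10 ^ t.length by ring,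
            Int.add_mul_emod_self_right]
      have hdd : T / 10 ^ t.length / 10 = T / 10 ^ (t.length + 1) := by
        rw [Int.ediv_ediv_of_nonneg (le_of_lt hm), pow_succ]
      have hsp : pvRevdigs (t.length + 1) (T % 10 ^ (t.length + 1))
          = pvRevdigs t.length (T % 10 ^ t.length) ++ [(T / 10 ^ t.length) % 10] := by
        rw [pv_revdigs_split]
        congr 1
        · congr 1
          exact Int.emod_emod_of_dvd T ⟨10, by ring⟩
        · have h4 := pv_mod_mul_div T (10 ^ t.length) 10 hm (by norm_num)
          rw [show (10 : Int) ^ t.length * 10 = 10 ^ (t.length + 1) by ring] at h4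
          rw [h4, Int.emod_emod_of_dvd _ dvd_rfl]
      simp only [pvStep, List.length_cons, hmod, hc, Prod.mk.injEq]
      exact ⟨hsp.symm, hdd⟩

-- A's indexed countdown loop is the fold of pvStep over the reversed column sums
theorem pv_A_loop (a : List (Int × Int)) :
    (PySem.List.pyRange ((a.length : Int) - 1) (-1) (-1)).foldl
      (fun (st : List Int × Int) i =>
        let v := (PySem.List.pyGetD a i (0, 0)).1 + (PySem.List.pyGetD a i (0, 0)).2 + st.2
        (st.1 ++ [PySem.Int.mod v 10], PySem.Int.floordiv v 10)) ([], 0) =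
    ((a.map (fun p => p.1 + p.2)).reverse).foldl pvStep ([], 0) := by
  have hr : PySem.List.pyRange ((a.length : Int) - 1) (-1) (-1)
      = (PySem.List.pyRange 0 (a.length : Int) 1).reverse := by
    rw [PySem.List.pyRange_neg_one_eq_reverse]
    norm_num
  rw [hr]
  have hmap : (PySem.List.pyRange 0 (a.length : Int) 1).map
      (fun i => PySem.List.pyGetD a i (0, 0)) = a :=
    PySem.List.map_pyGetD_pyRange_zero' a (0, 0)
  calc (PySem.List.pyRange 0 (a.length : Int) 1).reverse.foldl
        (fun (st : List Int × Int) i =>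
          let v := (PySem.List.pyGetD a i (0, 0)).1 + (PySem.List.pyGetD a i (0, 0)).2 + st.2
          (st.1 ++ [PySem.Int.mod v 10], PySem.Int.floordiv v 10)) ([], 0)
    _ = (((PySem.List.pyRange 0 (a.length : Int) 1).map
          (fun i => PySem.List.pyGetD a i (0, 0))).reverse).foldl
            (fun (st : List Int × Int) p =>
              (st.1 ++ [PySem.Int.mod (p.1 + p.2 + st.2) 10],
               PySem.Int.floordiv (p.1 + p.2 + st.2) 10)) ([], 0) := by
          rw [← List.map_reverse, List.foldl_map]
    _ = (a.reverse).foldl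
            (fun (st : List Int × Int) p =>
              (st.1 ++ [PySem.Int.mod (p.1 + p.2 + st.2) 10],
               PySem.Int.floordiv (p.1 + p.2 + st.2) 10)) ([], 0) := by rw [hmap]
    _ = ((a.map (fun p => p.1 + p.2)).reverse).foldl pvStep ([], 0) := by
          rw [← List.map_reverse, List.foldl_map]
          simp only [pvStep, pv_mod10, pv_div10]

-- ===== VERDICT (by name: the statement is the Claim_ definition above) =====
theorem supersum_spec : Claim_equal_supersum := by
  intro a _
  unfold Spec_supersum supersum supersum_alt
  simp only [pv_A_loop a, pv_main (a.map (fun p => p.1 + p.2)), List.length_map]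
  set n := a.length
  have hfold : (a.map (fun p => p.1 + p.2)).foldl (fun t y => 10 * t + y) 0
      = a.foldl (fun t p => 10 * t + p.1 + p.2) 0 := by
    rw [List.foldl_map]
    congr 1
    funext t p
    ring
  set t := a.foldl (fun t p => 10 * t + p.1 + p.2) 0 with ht
  have hp : (0 : Int) < 10 ^ n := by positivity
  have hc : PySem.Int.floordiv t (10 ^ n) = t / 10 ^ n :=
    PySem.Int.floordiv_eq_ediv_of_pos hp
  have hrem : PySem.Int.mod t (10 ^ n) = t % 10 ^ n :=
    PySem.Int.mod_eq_emod_of_pos hp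
  rw [hfold]
  rw [PySem.List.slice?_none_none_neg_one]
  simp only [Option.getD_some, hc, hrem, pv_altLoop_fst n [] (t % 10 ^ n), List.append_nil]
  by_cases h : t / 10 ^ n > 0
  · simp [h]
  · simp [h]
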